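-- pv_equiv track=rewrite | github.com/ahmadarsalann/Wumpus-World | aahmad3_ExplorerAgent.py | closest_to_dest
-- ===== SOURCE A (Python) =====
-- def closest_to_dest(hypothetical_move, destination):
--     which_is_the_least_steps = []
--     for i in range(len(hypothetical_move)):
--         a = abs(destination[0] - hypothetical_move[i][0])
--         b = abs(destination[1] - hypothetical_move[i][1])
--         c = a + b
--         which_is_the_least_steps.append(c)
--
--     if len(which_is_the_least_steps) > 0:
--         smallest_number = min(which_is_the_least_steps)
--         index = which_is_the_least_steps.index(smallest_number)
--         return hypothetical_move[index]
--     else: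
--         return "Nah"
-- ===== SOURCE B (Python) =====
-- def closest_to_dest(hypothetical_move, destination):
--     best_move = "Nah"
--     best_dist = None
--     for move in hypothetical_move:
--         d = abs(destination[0] - move[0]) + abs(destination[1] - move[1])
--         if best_dist is None or d < best_dist:
--             best_dist = d
--             best_move = move
--     return best_move
-- ===== Notes on version B (the rewrite author's own statement) =====
-- stated objective: simpler
-- what changed: Replaced the build-a-distance-list + min() + .index() + re-index pipeline by a single running-minimum pass that keeps the best move and its distance in two accumulators, never materializing the distance list; strict '<' keeps the first move among ties, matching min()+.index().
-- outside the precondition, e.g. on closest_to_dest([], (0, 0)): A returns 'Nah', B returns 'Nah'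
import Mathlib
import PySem

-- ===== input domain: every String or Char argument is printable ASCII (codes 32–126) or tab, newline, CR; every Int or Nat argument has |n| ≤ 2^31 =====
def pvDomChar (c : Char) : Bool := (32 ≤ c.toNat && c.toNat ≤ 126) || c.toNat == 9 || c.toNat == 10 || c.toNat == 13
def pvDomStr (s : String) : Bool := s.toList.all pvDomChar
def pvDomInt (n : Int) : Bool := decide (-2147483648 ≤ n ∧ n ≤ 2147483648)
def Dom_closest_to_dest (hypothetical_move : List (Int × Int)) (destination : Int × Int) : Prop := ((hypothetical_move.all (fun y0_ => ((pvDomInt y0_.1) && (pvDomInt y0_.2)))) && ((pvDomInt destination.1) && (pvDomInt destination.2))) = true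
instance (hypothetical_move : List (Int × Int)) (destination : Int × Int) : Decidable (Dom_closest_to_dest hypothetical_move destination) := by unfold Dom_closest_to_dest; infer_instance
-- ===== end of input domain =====

-- B replaces A's distance-list + min() + .index() + re-index pipeline with a single
-- running-minimum pass (objective: simpler).  Equivalence is about the return value on
-- non-empty inputs; on [] the Python A returns the string "Nah", outside the return type.

-- ===== PORT A =====
-- A builds the list of Manhattan distances by an index loop, then takes min, its first
-- index, and indexes the move list there.  On the empty list Python returns "Nah" (a
-- string, no Int × Int exists); that input is excluded by Pre_ and the port yields (0, 0).
def closest_to_dest (hypothetical_move : List (Int × Int)) (destination : Int × Int) : Int × Int :=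
  let which_is_the_least_steps :=
    (PySem.List.pyRange 0 hypothetical_move.length 1).foldl
      (fun acc i =>
        let m := PySem.List.pyGetD hypothetical_move i (0, 0)
        let a := |destination.1 - m.1|
        let b := |destination.2 - m.2|
        let c := a + b
        acc ++ [c]) []
  if which_is_the_least_steps.length > 0 then
    match PySem.List.min? which_is_the_least_steps (fun x => x) with
    | some smallest_number =>
      match PySem.List.index? which_is_the_least_steps smallest_number with
      | some index => PySem.List.pyGetD hypothetical_move (index : Int) (0, 0)
      | none => (0, 0)   -- unreachable: the minimum is a member of the list
    | none => (0, 0)     -- unreachable: the list is non-empty here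
  else (0, 0)            -- Python: return "Nah" (excluded by Pre_)

-- ===== PORT B =====
-- B's single pass: best_move = "Nah" / best_dist = None, update on strictly smaller
-- distance.  The "Nah" sentinel is the `none` state; under Pre_ it is always replaced.
def closest_to_dest_alt (hypothetical_move : List (Int × Int)) (destination : Int × Int) : Int × Int :=
  let st :=
    hypothetical_move.foldl
      (fun (st : Option (Int × Int) × Option Int) move =>
        let d := |destination.1 - move.1| + |destination.2 - move.2|
        match st.2 with
        | none => (some move, some d)
        | some bd => if d < bd then (some move, some d) else st)
      (none, none)
  match st.1 with
  | some best_move => best_move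
  | none => (0, 0)       -- Python: return "Nah" (excluded by Pre_)

-- ===== PRECONDITION & SPEC =====
-- Pre_ excludes only the empty move list, on which A returns the string "Nah" — not a
-- value of the declared pair type.
def Pre_closest_to_dest (hypothetical_move : List (Int × Int)) (destination : Int × Int) : Prop :=
  hypothetical_move ≠ []
instance (hypothetical_move : List (Int × Int)) (destination : Int × Int) : Decidable (Pre_closest_to_dest hypothetical_move destination) := by unfold Pre_closest_to_dest; infer_instance
def pvWitness_closest_to_dest : (List (Int × Int)) × (Int × Int) := ([(1, 2), (3, 4)], (0, 0))

def Spec_closest_to_dest (hypothetical_move : List (Int × Int)) (destination : Int × Int) (out : Int × Int) : Prop := out = closest_to_dest_alt hypothetical_move destination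
instance (hypothetical_move : List (Int × Int)) (destination : Int × Int) (out : Int × Int) : Decidable (Spec_closest_to_dest hypothetical_move destination out) := by unfold Spec_closest_to_dest; infer_instance

-- ===== CLAIM (what is proved, stated in full; the proofs are below) =====
def Claim_equal_closest_to_dest : Prop := ∀ (hypothetical_move : List (Int × Int)) (destination : Int × Int), Dom_closest_to_dest hypothetical_move destination → Pre_closest_to_dest hypothetical_move destination → Spec_closest_to_dest hypothetical_move destination (closest_to_dest hypothetical_move destination)

-- ===== LEMMAS AND PROOFS =====

-- First-argmin reference: scan xs keeping `best`, replace on strictly smaller key.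
def pvFam (f : (Int × Int) → Int) (best : Int × Int) : List (Int × Int) → Int × Int
  | [] => best
  | x :: xs => if f x < f best then pvFam f x xs else pvFam f best xs

lemma pvFoldlMin_le_init (l : List Int) (a : Int) : l.foldl min a ≤ a := by
  induction l generalizing a with
  | nil => simp
  | cons x xs ih => exact le_trans (ih (min a x)) (min_le_left a x)

-- A's min + first-index + re-index on a non-empty list is exactly the first-argmin scan.
lemma pvA_char (f : (Int × Int) → Int) :
    ∀ (xs : List (Int × Int)) (x : Int × Int),
      (match PySem.List.index? (List.map f (x :: xs)) (List.foldl min (f x) (List.map f xs)) with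
        | some k => (x :: xs).getD k (0, 0)
        | none => ((0 : Int), (0 : Int))) = pvFam f x xs := by
  intro xs
  induction xs with
  | nil =>
    intro x
    simp [pvFam]
  | cons y ys ih =>
    intro x
    simp only [List.map_cons, List.foldl_cons] at *
    by_cases hyx : f y < f x
    · have hmm : min (f x) (f y) = f y := by omega
      rw [hmm]
      have hne : f x ≠ List.foldl min (f y) (List.map f ys) := by
        have hlt : List.foldl min (f y) (List.map f ys) < f x :=
          lt_of_le_of_lt (pvFoldlMin_le_init _ _) hyx
        omega
      rw [PySem.List.index?_cons_of_ne _ hne]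
      have hIH := ih y
      rcases h : PySem.List.index? (f y :: List.map f ys)
          (List.foldl min (f y) (List.map f ys)) with _ | k
      · rw [h] at hIH
        simp only [Option.map_none]
        show ((0 : Int), (0 : Int)) = pvFam f x (y :: ys)
        simp only [pvFam, if_pos hyx]
        exact hIH
      · rw [h] at hIH
        simp only [Option.map_some]
        show (x :: y :: ys).getD (k + 1) (0, 0) = pvFam f x (y :: ys)
        rw [List.getD_cons_succ]
        simp only [pvFam, if_pos hyx]
        exact hIH
    · have hmm : min (f x) (f y) = f x := by omega
      rw [hmm]
      have hIH := ih x
      by_cases hsx : List.foldl min (f x) (List.map f ys) = f x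
      · rw [hsx] at hIH ⊢
        rw [PySem.List.index?_cons_self] at hIH ⊢
        show (x :: y :: ys).getD 0 (0, 0) = pvFam f x (y :: ys)
        rw [List.getD_cons_zero]
        simp only [pvFam, if_neg hyx]
        exact hIH
      · have hle := pvFoldlMin_le_init (List.map f ys) (f x)
        have hnex : f x ≠ List.foldl min (f x) (List.map f ys) := fun hh => hsx hh.symm
        have hney : f y ≠ List.foldl min (f x) (List.map f ys) := by omega
        rw [PySem.List.index?_cons_of_ne _ hnex] at hIH
        rw [PySem.List.index?_cons_of_ne _ hnex, PySem.List.index?_cons_of_ne _ hney]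
        rcases h : PySem.List.index? (List.map f ys)
            (List.foldl min (f x) (List.map f ys)) with _ | k
        · rw [h] at hIH
          simp only [Option.map_none] at hIH ⊢
          show ((0 : Int), (0 : Int)) = pvFam f x (y :: ys)
          simp only [pvFam, if_neg hyx]
          exact hIH
        · rw [h] at hIH
          simp only [Option.map_some] at hIH ⊢
          show (x :: y :: ys).getD (k + 1 + 1) (0, 0) = pvFam f x (y :: ys)
          rw [List.getD_cons_succ, List.getD_cons_succ]
          simp only [pvFam, if_neg hyx]
          rw [← hIH, List.getD_cons_succ]

-- B's fold, once the state holds a real best (m, f m), computes the first-argmin scan.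
lemma pvB_fold (f : (Int × Int) → Int) :
    ∀ (xs : List (Int × Int)) (m : Int × Int),
      xs.foldl
        (fun (st : Option (Int × Int) × Option Int) move =>
          match st.2 with
          | none => (some move, some (f move))
          | some bd => if f move < bd then (some move, some (f move)) else st)
        (some m, some (f m))
      = (some (pvFam f m xs), some (f (pvFam f m xs))) := by
  intro xs
  induction xs with
  | nil => intro m; simp [pvFam]
  | cons x xs ih =>
    intro m
    by_cases h : f x < f m
    · simp only [List.foldl_cons, pvFam, h, if_true]
      exact ih x
    · simp only [List.foldl_cons, pvFam, h, if_false]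
      exact ih m

theorem pv_main (hm : List (Int × Int)) (dest : Int × Int) (hne : hm ≠ []) :
    closest_to_dest hm dest = closest_to_dest_alt hm dest := by
  obtain ⟨x, xs, rfl⟩ := List.exists_cons_of_ne_nil hne
  set f : (Int × Int) → Int := fun m => |dest.1 - m.1| + |dest.2 - m.2| with hf
  -- A side: the index loop builds the mapped distance list
  have hw : (PySem.List.pyRange 0 (x :: xs).length 1).foldl
      (fun (acc : List Int) i =>
        let m := PySem.List.pyGetD (x :: xs) i (0, 0)
        let a := |dest.1 - m.1|
        let b := |dest.2 - m.2|
        let c := a + b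
        acc ++ [c]) []
      = (x :: xs).map f := by
    have h1 := PySem.List.foldl_pyRange_zero_pyGetD (x :: xs) ((0, 0) : Int × Int)
      (fun (acc : List Int) (m : Int × Int) => acc ++ [f m]) []
    have h2 := PySem.List.foldl_append_singleton_eq_map f (x :: xs) []
    simpa [hf] using h1.trans h2
  -- B side
  have hb : closest_to_dest_alt (x :: xs) dest = pvFam f x xs := by
    unfold closest_to_dest_alt
    simp only [List.foldl_cons]
    have := pvB_fold f xs x
    simp only [hf] at this ⊢
    rw [this]
  unfold closest_to_dest
  simp only [hw]
  rw [hb]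
  simp only [List.map_cons, List.length_cons, PySem.List.min?_id_cons]
  rw [if_pos (by omega : (List.map f xs).length + 1 > 0)]
  have hA := pvA_char f xs x
  simp only [List.map_cons] at hA
  rcases h : PySem.List.index? (f x :: List.map f xs)
      (List.foldl min (f x) (List.map f xs)) with _ | k
  · rw [h] at hA
    show ((0 : Int), (0 : Int)) = pvFam f x xs
    exact hA
  · rw [h] at hA
    show PySem.List.pyGetD (x :: xs) ((k : Nat) : Int) (0, 0) = pvFam f x xs
    rw [PySem.List.pyGetD_natCast]
    exact hA

-- ===== VERDICT (by name: the statement is the Claim_ definition above) =====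
theorem closest_to_dest_spec : Claim_equal_closest_to_dest := by
  intro hm dest _ hpre
  unfold Spec_closest_to_dest
  exact pv_main hm dest hpre
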